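-- pv_equiv track=rewrite | github.com/cky2005/RSS | fetch_feeds.py | get_feed_category
-- ===== SOURCE A (Python) =====
-- def get_feed_category(feed_url, feed_list_content):
--     lines = feed_list_content.split('\n')
--     current_category = None
--     for line in lines:
--         line = line.strip()
--         if line.endswith(':'):
--             current_category = line[:-1]
--         elif line == feed_url:
--             return current_category
--     return 'Blog'
-- ===== SOURCE B (Python) =====
-- def get_feed_category(feed_url, feed_list_content):
--     table = {}
--     current_category = None
--     for raw in feed_list_content.split('\n'):
--         line = raw.strip()
--         if line.endswith(':'):
--             current_category = line[:-1]
--         elif current_category is not None: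
--             table.setdefault(line, current_category)
--     return table.get(feed_url, 'Blog')
-- ===== Notes on version B (the rewrite author's own statement) =====
-- stated objective: alternative
-- what changed: Replaces A's early-return scan with a single pass that builds a line-to-category index (setdefault keeps the first occurrence, lines seen before any 'Category:' header are not indexed) followed by one dictionary lookup with default 'Blog'.
-- outside the precondition, e.g. on get_feed_category('a', 'a\nX:'): A returns None, B returns 'Blog'
import Mathlib
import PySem

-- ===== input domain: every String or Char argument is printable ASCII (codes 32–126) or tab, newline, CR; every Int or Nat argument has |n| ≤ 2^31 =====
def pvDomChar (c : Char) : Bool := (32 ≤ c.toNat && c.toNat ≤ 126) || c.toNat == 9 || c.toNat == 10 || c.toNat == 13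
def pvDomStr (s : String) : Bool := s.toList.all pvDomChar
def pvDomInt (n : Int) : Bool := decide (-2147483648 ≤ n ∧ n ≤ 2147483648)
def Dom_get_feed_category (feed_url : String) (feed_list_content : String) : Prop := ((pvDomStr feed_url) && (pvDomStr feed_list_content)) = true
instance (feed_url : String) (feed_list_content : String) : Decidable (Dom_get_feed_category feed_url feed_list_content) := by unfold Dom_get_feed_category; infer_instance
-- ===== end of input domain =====

-- B builds a first-occurrence line→category index in one pass and answers by a single lookup
-- instead of A's early-return scan; equal cost, different structure (alternative).


-- ===== PORT A =====
-- A's for-loop with early return, as structural recursion over the split lines.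
def pvAloop (feed_url : String) (cur : Option String) : List String → String
  | [] => "Blog"
  | raw :: rest =>
    let line := PySem.Str.strip raw
    if PySem.Str.endswith line ":" then
      pvAloop feed_url (some (PySem.Str.slice line none (some (-1)))) rest
    else if line = feed_url then
      -- Python returns current_category here; when it is None the return value is not a
      -- String (that input is excluded by Pre_), so the port defaults arbitrarily.
      cur.getD "Blog"
    else pvAloop feed_url cur rest

def get_feed_category (feed_url : String) (feed_list_content : String) : String :=
  pvAloop feed_url none ((PySem.Str.split? feed_list_content "\n").getD [])

-- ===== PORT B =====
-- B's single pass: state = (table, current_category); setdefault records first occurrences.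
def pvBloop : PySem.Dict String String × Option String → List String → PySem.Dict String String × Option String
  | st, [] => st
  | st, raw :: rest =>
    let line := PySem.Str.strip raw
    if PySem.Str.endswith line ":" then
      pvBloop (st.1, some (PySem.Str.slice line none (some (-1)))) rest
    else
      match st.2 with
      | some c => pvBloop (st.1.setdefault line c, st.2) rest
      | none => pvBloop st rest

def get_feed_category_alt (feed_url : String) (feed_list_content : String) : String :=
  let st := pvBloop (PySem.Dict.empty, none) ((PySem.Str.split? feed_list_content "\n").getD [])
  st.1.getD feed_url "Blog"

-- ===== PRECONDITION & SPEC =====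
-- Pre_ excludes only inputs where feed_url occurs as a stripped line BEFORE any 'Category:'
-- header line: there Python A returns None, which is not a value of the declared str type.
def Pre_get_feed_category (feed_url : String) (feed_list_content : String) : Prop :=
  feed_url ∉ ((((PySem.Str.split? feed_list_content "\n").getD []).map PySem.Str.strip).takeWhile
    (fun l => !PySem.Str.endswith l ":"))
instance (feed_url : String) (feed_list_content : String) : Decidable (Pre_get_feed_category feed_url feed_list_content) := by unfold Pre_get_feed_category; infer_instance

def pvWitness_get_feed_category : String × String := ("http://x", "News:\nhttp://x\nother")

def Spec_get_feed_category (feed_url : String) (feed_list_content : String) (out : String) : Prop := out = get_feed_category_alt feed_url feed_list_content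
instance (feed_url : String) (feed_list_content : String) (out : String) : Decidable (Spec_get_feed_category feed_url feed_list_content out) := by unfold Spec_get_feed_category; infer_instance

-- ===== CLAIM (what is proved, stated in full; the proofs are below) =====
def Claim_equal_get_feed_category : Prop := ∀ (feed_url : String) (feed_list_content : String), Dom_get_feed_category feed_url feed_list_content → Pre_get_feed_category feed_url feed_list_content → Spec_get_feed_category feed_url feed_list_content (get_feed_category feed_url feed_list_content)

-- ===== LEMMAS AND PROOFS =====

-- B's fold preserves already-recorded entries (setdefault never overwrites).
theorem pvBloop_preserves (ls : List String) :
    ∀ (tbl : PySem.Dict String String) (cur : Option String) (k : String) (v : String),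
      tbl.get? k = some v → ((pvBloop (tbl, cur) ls).1).get? k = some v := by
  induction ls with
  | nil => intro tbl cur k v h; simpa [pvBloop] using h
  | cons raw rest ih =>
    intro tbl cur k v h
    simp only [pvBloop]
    split
    · exact ih tbl _ k v h
    · match hc : cur with
      | some c =>
        apply ih
        by_cases hk : k = PySem.Str.strip raw
        · subst hk
          rw [PySem.Dict.setdefault_of_contains]
          · exact h
          · rw [PySem.Dict.contains_eq_isSome_get?, h]; rfl
        · rw [PySem.Dict.get?_setdefault_of_ne _ c hk]; exact h
      | none => exact ih tbl none k v h

-- Phase 2: after the first category header both programs agree, for any table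
-- not yet containing feed_url.
theorem pv_phase2 (feed_url : String) (ls : List String) :
    ∀ (c : String) (tbl : PySem.Dict String String), tbl.get? feed_url = none →
      pvAloop feed_url (some c) ls = ((pvBloop (tbl, some c) ls).1).getD feed_url "Blog" := by
  induction ls with
  | nil =>
    intro c tbl h
    simp [pvAloop, pvBloop, PySem.Dict.getD_eq_get?_getD, h]
  | cons raw rest ih =>
    intro c tbl h
    simp only [pvAloop, pvBloop]
    split
    · exact ih _ tbl h
    · by_cases heq : PySem.Str.strip raw = feed_url
      · rw [if_pos heq]
        have hnc : tbl.contains (PySem.Str.strip raw) = false := by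
          rw [heq, PySem.Dict.contains_eq_isSome_get?, h]; rfl
        rw [PySem.Dict.setdefault_of_not_contains tbl c hnc, heq]
        have hget : (tbl.insert feed_url c).get? feed_url = some c :=
          PySem.Dict.get?_insert_self tbl feed_url c
        have hp := pvBloop_preserves rest (tbl.insert feed_url c) (some c) feed_url c hget
        simp [PySem.Dict.getD_eq_get?_getD, hp]
      · rw [if_neg heq]
        apply ih
        rw [PySem.Dict.get?_setdefault_of_ne tbl c (Ne.symm heq)]
        exact h

-- Phase 1: before any category header; Pre_ guarantees feed_url is not met here.
theorem pv_phase1 (feed_url : String) (ls : List String) :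
    feed_url ∉ ((ls.map PySem.Str.strip).takeWhile (fun l => !PySem.Str.endswith l ":")) →
      pvAloop feed_url none ls = ((pvBloop (PySem.Dict.empty, none) ls).1).getD feed_url "Blog" := by
  induction ls with
  | nil => intro _; simp [pvAloop, pvBloop, PySem.Dict.getD_empty]
  | cons raw rest ih =>
    intro h
    simp only [pvAloop, pvBloop]
    by_cases he : PySem.Str.endswith (PySem.Str.strip raw) ":"
    · rw [if_pos he, if_pos he]
      exact pv_phase2 feed_url rest _ PySem.Dict.empty (PySem.Dict.get?_empty _)
    · rw [if_neg he, if_neg he]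
      rw [List.map_cons, List.takeWhile_cons, if_pos (by simpa using he),
        List.mem_cons, not_or] at h
      rw [if_neg (fun hh => h.1 hh.symm)]
      exact ih h.2

-- ===== VERDICT (by name: the statement is the Claim_ definition above) =====
theorem get_feed_category_spec : Claim_equal_get_feed_category := by
  intro feed_url feed_list_content _ hpre
  unfold Spec_get_feed_category get_feed_category get_feed_category_alt
  exact pv_phase1 feed_url _ hpre
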